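-- pv_equiv track=rewrite | github.com/rumbu13/ha-mediabrowser | custom_components/mediabrowser/hub.py | _get_changed_sessions
-- ===== SOURCE A (Python) =====
-- from typing import Any, Awaitable
--
-- def _get_changed_sessions(
--
--     old_sessions: dict[str, dict[str, Any]],
--     new_sessions: dict[str, dict[str, Any]],
-- ) -> tuple[
--     list[dict[str, Any]],
--     list[dict[str, Any]],
--     list[tuple[dict[str, Any], dict[str, Any]]],
-- ]:
--     added_sessions = [
--         session
--         for session_id, session in new_sessions.items()
--         if session_id not in old_sessions
--     ]
--
--     removed_sessions = [
--         session
--         for session_id, session in old_sessions.items()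
--         if session_id not in new_sessions
--     ]
--
--     updated_sessions = [
--         (old_sessions[session_id], session)
--         for session_id, session in new_sessions.items()
--         if session_id in old_sessions and old_sessions[session_id] != session
--     ]
--
--     return (added_sessions, removed_sessions, updated_sessions)
-- ===== SOURCE B (Python) =====
-- def _get_changed_sessions(old_sessions, new_sessions):
--     # Sort-merge diff: classify every key by a two-pointer sweep over the two
--     # sorted key sequences (no hash-membership tests), then emit the three
--     # lists in original dict order using the classification.
--     so = sorted(old_sessions.items(), key=lambda kv: kv[0])
--     sn = sorted(new_sessions)
--     status = {}          # new key -> old session if common, else None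
--     removed_keys = set() # keys only in old
--     i = j = 0
--     while i < len(so) or j < len(sn):
--         if i == len(so):
--             status[sn[j]] = None
--             j += 1
--         elif j == len(sn):
--             removed_keys.add(so[i][0])
--             i += 1
--         elif so[i][0] == sn[j]:
--             status[sn[j]] = so[i][1]
--             i += 1
--             j += 1
--         elif so[i][0] < sn[j]:
--             removed_keys.add(so[i][0])
--             i += 1
--         else:
--             status[sn[j]] = None
--             j += 1
--     added = []
--     updated = []
--     for key, session in new_sessions.items():
--         old = status[key]
--         if old is None:
--             added.append(session)
--         elif old != session:
--             updated.append((old, session))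
--     removed = [s for k, s in old_sessions.items() if k in removed_keys]
--     return (added, removed, updated)
-- ===== Notes on version B (the rewrite author's own statement) =====
-- stated objective: alternative
-- what changed: Replaces A's hash-membership comprehensions by a sort-merge diff: both key sequences are sorted and a single two-pointer sweep classifies every key as added/removed/common (recording the old session for common keys), after which the three result lists are emitted in original dict order from that classification.
import Mathlib
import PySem

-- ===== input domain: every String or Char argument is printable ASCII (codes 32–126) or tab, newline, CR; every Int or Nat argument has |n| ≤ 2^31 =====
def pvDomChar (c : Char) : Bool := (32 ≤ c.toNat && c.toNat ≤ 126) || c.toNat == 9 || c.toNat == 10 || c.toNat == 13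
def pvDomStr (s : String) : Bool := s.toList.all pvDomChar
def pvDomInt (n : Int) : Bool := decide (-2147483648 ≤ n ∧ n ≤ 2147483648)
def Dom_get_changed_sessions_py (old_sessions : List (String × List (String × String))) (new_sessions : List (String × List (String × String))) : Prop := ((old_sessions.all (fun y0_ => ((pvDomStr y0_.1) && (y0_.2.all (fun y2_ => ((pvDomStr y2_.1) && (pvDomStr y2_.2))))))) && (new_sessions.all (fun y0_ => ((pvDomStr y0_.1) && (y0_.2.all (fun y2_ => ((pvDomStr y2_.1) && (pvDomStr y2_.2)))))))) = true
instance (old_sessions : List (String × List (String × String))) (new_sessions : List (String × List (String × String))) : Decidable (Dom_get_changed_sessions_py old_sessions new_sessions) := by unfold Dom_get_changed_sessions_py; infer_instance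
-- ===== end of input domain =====

-- B replaces A's hash-membership comprehensions by a sort-merge key sweep; objective: alternative.
-- Shared primitives (Python dict lookup / membership / dict ==, first-match on the association list):
def pvLookup (d : List (String × List (String × String))) (k : String) : Option (List (String × String)) :=
  (d.find? (fun p => p.1 == k)).map (·.2)

def pvKeyMem (d : List (String × List (String × String))) (k : String) : Bool :=
  d.any (fun p => p.1 == k)

-- Python's `==` on dicts ignores insertion order: equal keys-as-a-set with equal values.
-- Exact for association lists with unique keys (guaranteed by Pre_).
def pvDictEq (a b : List (String × String)) : Bool :=
  (a.length == b.length) && a.all (fun p => (b.find? (fun q => q.1 == p.1)).map (·.2) == some p.2)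

-- ===== PORT A =====
def get_changed_sessions_py (old_sessions : List (String × List (String × String))) (new_sessions : List (String × List (String × String))) : (List (List (String × String))) × (List (List (String × String))) × (List ((List (String × String)) × (List (String × String)))) :=
  let added_sessions :=
    (new_sessions.filter (fun p => !(pvKeyMem old_sessions p.1))).map (·.2)
  let removed_sessions :=
    (old_sessions.filter (fun p => !(pvKeyMem new_sessions p.1))).map (·.2)
  let updated_sessions :=
    new_sessions.filterMap (fun p =>
      match pvLookup old_sessions p.1 with
      | some o => if !(pvDictEq o p.2) then some (o, p.2) else none
      | none => none)
  (added_sessions, removed_sessions, updated_sessions)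

-- ===== PORT B =====
-- The two-pointer while loop over the two sorted key sequences, as the obvious
-- structural recursion on the two remaining suffixes (i/j advance = dropping a head).
def bMerge : List (String × List (String × String)) → List String →
    PySem.Dict String (Option (List (String × String))) → PySem.Set String →
    PySem.Dict String (Option (List (String × String))) × PySem.Set String
  | [], [], status, removed => (status, removed)
  | [], nk :: sn, status, removed => bMerge [] sn (status.insert nk none) removed
  | (ok, _) :: so, [], status, removed => bMerge so [] status (PySem.Set.add removed ok)
  | (ok, ov) :: so, nk :: sn, status, removed =>
    if ok == nk then bMerge so sn (status.insert nk (some ov)) removed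
    else if ok < nk then bMerge so (nk :: sn) status (PySem.Set.add removed ok)
    else bMerge ((ok, ov) :: so) sn (status.insert nk none) removed
  termination_by so sn _ _ => so.length + sn.length

def get_changed_sessions_py_alt (old_sessions : List (String × List (String × String))) (new_sessions : List (String × List (String × String))) : (List (List (String × String))) × (List (List (String × String))) × (List ((List (String × String)) × (List (String × String)))) :=
  let so := PySem.List.sorted old_sessions (·.1) false
  let sn := PySem.List.sorted (new_sessions.map (·.1)) (fun x => x) false
  let m := bMerge so sn PySem.Dict.empty PySem.Set.empty
  -- status[key]: KeyError cannot happen (every new key was inserted); getD none is that lookup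
  let au := new_sessions.foldl
    (fun (acc : List (List (String × String)) × List ((List (String × String)) × (List (String × String)))) p =>
      match m.1.getD p.1 none with
      | none => (acc.1 ++ [p.2], acc.2)
      | some o => if pvDictEq o p.2 then acc else (acc.1, acc.2 ++ [(o, p.2)]))
    ([], [])
  let removed := (old_sessions.filter (fun p => PySem.Set.contains m.2 p.1)).map (·.2)
  (au.1, removed, au.2)

-- ===== PRECONDITION & SPEC =====
-- Pre_ excludes association lists with duplicate keys (outer or inner): they do not encode any
-- Python dict argument (a dict has unique keys by construction), so A's behaviour there is not defined.
def Pre_get_changed_sessions_py (old_sessions : List (String × List (String × String))) (new_sessions : List (String × List (String × String))) : Prop :=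
  (old_sessions.map (·.1)).Nodup ∧ (new_sessions.map (·.1)).Nodup ∧
  (∀ p ∈ old_sessions, (p.2.map (·.1)).Nodup) ∧ (∀ p ∈ new_sessions, (p.2.map (·.1)).Nodup)
instance (old_sessions : List (String × List (String × String))) (new_sessions : List (String × List (String × String))) : Decidable (Pre_get_changed_sessions_py old_sessions new_sessions) := by unfold Pre_get_changed_sessions_py; infer_instance

def pvWitness_get_changed_sessions_py : (List (String × List (String × String))) × (List (String × List (String × String))) :=
  ([("a", [("k", "1")]), ("b", [])], [("a", [("k", "2")]), ("c", [])])

def Spec_get_changed_sessions_py (old_sessions : List (String × List (String × String))) (new_sessions : List (String × List (String × String))) (out : (List (List (String × String))) × (List (List (String × String))) × (List ((List (String × String)) × (List (String × String))))) : Prop := out = get_changed_sessions_py_alt old_sessions new_sessions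
instance (old_sessions : List (String × List (String × String))) (new_sessions : List (String × List (String × String))) (out : (List (List (String × String))) × (List (List (String × String))) × (List ((List (String × String)) × (List (String × String))))) : Decidable (Spec_get_changed_sessions_py old_sessions new_sessions out) := by unfold Spec_get_changed_sessions_py; infer_instance

-- ===== CLAIM (what is proved, stated in full; the proofs are below) =====
def Claim_equal_get_changed_sessions_py : Prop := ∀ (old_sessions : List (String × List (String × String))) (new_sessions : List (String × List (String × String))), Dom_get_changed_sessions_py old_sessions new_sessions → Pre_get_changed_sessions_py old_sessions new_sessions → Spec_get_changed_sessions_py old_sessions new_sessions (get_changed_sessions_py old_sessions new_sessions)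

-- ===== LEMMAS AND PROOFS =====

theorem pvKeyMem_iff (l : List (String × List (String × String))) (k : String) :
    pvKeyMem l k = true ↔ k ∈ l.map (·.1) := by
  simp [pvKeyMem, List.any_eq_true, List.mem_map]

theorem pvLookup_eq_none_of_not_mem (l : List (String × List (String × String))) (k : String)
    (h : k ∉ l.map (·.1)) : pvLookup l k = none := by
  simp only [pvLookup, Option.map_eq_none_iff, List.find?_eq_none]
  intro p hp
  simp only [beq_iff_eq]
  intro he
  exact h (List.mem_map.mpr ⟨p, hp, he⟩)

-- first-match lookup in a duplicate-free association list does not depend on the order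
theorem pvLookup_perm (l l' : List (String × List (String × String)))
    (h : l.Perm l') (hn : (l.map (·.1)).Nodup) (k : String) :
    pvLookup l k = pvLookup l' k := by
  induction h with
  | nil => rfl
  | cons x _ ih =>
    simp only [List.map_cons, List.nodup_cons] at hn
    by_cases hx : x.1 == k
    · simp [pvLookup, hx]
    · simp only [pvLookup, List.find?_cons, hx]
      exact ih hn.2
  | swap x y t =>
    simp only [List.map_cons, List.nodup_cons, List.mem_cons] at hn
    have hne : y.1 ≠ x.1 := fun he => hn.1 (Or.inl he)
    by_cases hy : y.1 == k <;> by_cases hx : x.1 == k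
    · exact absurd (by rw [beq_iff_eq] at hy hx; rw [hy, hx]) hne
    · simp [pvLookup, hx, hy]
    · simp [pvLookup, hx, hy]
    · simp [pvLookup, hx, hy]
  | trans h1 _ ih1 ih2 =>
    rw [ih1 hn, ih2 ((h1.map (·.1)).nodup_iff.mp hn)]

-- the merge sweep, characterised: status answers every key of sn with the old-side
-- first-match lookup, and the removed set collects exactly the old-only keys
theorem bMerge_spec :
    ∀ (so : List (String × List (String × String))) (sn : List String)
      (status : PySem.Dict String (Option (List (String × String)))) (removed : PySem.Set String),
      (so.map (·.1)).Pairwise (· < ·) → sn.Pairwise (· < ·) →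
      (∀ k, (bMerge so sn status removed).1.get? k =
          if k ∈ sn then some (pvLookup so k) else status.get? k)
      ∧ (∀ k, k ∈ (bMerge so sn status removed).2 ↔
          k ∈ removed ∨ (k ∈ so.map (·.1) ∧ k ∉ sn)) := by
  intro so sn status removed
  induction so, sn, status, removed using bMerge.induct with
  | case1 => intro _ _; simp [bMerge]
  | case2 nk sn status removed ih =>
    intro hso hsn
    simp only [List.pairwise_cons] at hsn
    obtain ⟨ihg, ihr⟩ := ih hso hsn.2
    constructor
    · intro k
      rw [bMerge]
      rw [ihg k]
      by_cases hk : k ∈ sn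
      · simp [hk, pvLookup]
      · by_cases he : k = nk
        · subst he; simp [hk, pvLookup]
        · simp [hk, he, PySem.Dict.get?_insert]
    · intro k
      rw [bMerge, ihr k]
      simp
  | case3 ok ov so status removed ih =>
    intro hso _
    simp only [List.map_cons, List.pairwise_cons] at hso
    obtain ⟨ihg, ihr⟩ := ih hso.2 (List.Pairwise.nil)
    constructor
    · intro k; rw [bMerge, ihg k]; simp
    · intro k
      rw [bMerge, ihr k]
      rw [PySem.Set.mem_add]
      simp only [List.map_cons, List.mem_cons, List.not_mem_nil, not_false_iff, and_true]
      tauto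
  | case4 ok ov so nk sn status removed heq ih =>
    intro hso hsn
    have hok : ok = nk := by rwa [beq_iff_eq] at heq
    simp only [List.map_cons, List.pairwise_cons] at hso
    simp only [List.pairwise_cons] at hsn
    obtain ⟨ihg, ihr⟩ := ih hso.2 hsn.2
    constructor
    · intro k
      rw [bMerge, if_pos heq, ihg k]
      by_cases hk : k ∈ sn
      · have hkne : k ≠ ok := by
          intro he; subst he; exact absurd rfl (ne_of_gt (hok ▸ hsn.1 k hk))
        have : (ok == k) = false := by simp [beq_eq_false_iff_ne]; exact fun h => hkne h.symm
        simp [hk, pvLookup, this]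
      · by_cases he : k = nk
        · subst he
          simp [hk, pvLookup, heq]
        · simp [hk, he, PySem.Dict.get?_insert]
    · intro k
      rw [bMerge, if_pos heq, ihr k]
      simp only [List.map_cons, List.mem_cons]
      by_cases he : k = ok
      · subst he
        have h1 : k ∉ so.map (·.1) := fun hm => absurd rfl (ne_of_gt (hso.1 k hm))
        have h2 : k = nk := hok
        tauto
      · have h2 : ¬ k = nk := fun h => he (by rw [h]; exact hok.symm)
        tauto
  | case5 ok ov so nk sn status removed heq hlt ih =>
    intro hso hsn
    simp only [List.map_cons, List.pairwise_cons] at hso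
    have hsn' := hsn
    simp only [List.pairwise_cons] at hsn'
    obtain ⟨ihg, ihr⟩ := ih hso.2 hsn
    have hoknot : ok ∉ nk :: sn := by
      intro hm
      rcases List.mem_cons.mp hm with he | hm'
      · exact absurd he (ne_of_lt hlt)
      · exact absurd rfl (ne_of_lt (lt_trans hlt (hsn'.1 ok hm')))
    constructor
    · intro k
      rw [bMerge, if_neg (by simp [heq]), if_pos hlt, ihg k]
      by_cases hk : k ∈ nk :: sn
      · have hkne : k ≠ ok := fun he => hoknot (he ▸ hk)
        have : (ok == k) = false := by simp [beq_eq_false_iff_ne]; exact fun h => hkne h.symm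
        simp [hk, pvLookup, this]
      · simp [hk]
    · intro k
      rw [bMerge, if_neg (by simp [heq]), if_pos hlt, ihr k]
      rw [PySem.Set.mem_add]
      by_cases he : k = ok
      · subst he; simp [hoknot]
      · simp only [List.map_cons, List.mem_cons]
        tauto
  | case6 ok ov so nk sn status removed heq hlt ih =>
    intro hso hsn
    have hok : ¬ ok = nk := by rwa [beq_iff_eq] at heq
    have hnk : nk < ok := lt_of_le_of_ne (le_of_not_gt hlt) (fun h => hok h.symm)
    simp only [List.pairwise_cons] at hsn
    obtain ⟨ihg, ihr⟩ := ih hso hsn.2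
    have hso' := hso
    simp only [List.map_cons, List.pairwise_cons] at hso'
    have hnknot : nk ∉ ((ok, ov) :: so).map (·.1) := by
      simp only [List.map_cons, List.mem_cons]
      rintro (he | hm)
      · exact absurd he (ne_of_lt hnk)
      · exact absurd rfl (ne_of_lt (lt_trans hnk (hso'.1 nk hm)))
    constructor
    · intro k
      rw [bMerge, if_neg (by simp [heq]), if_neg (by simpa using hlt), ihg k]
      by_cases hk : k ∈ sn
      · simp [hk, List.mem_cons.mpr (Or.inr hk)]
      · by_cases he : k = nk
        · subst he
          rw [pvLookup_eq_none_of_not_mem _ _ hnknot]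
          simp [hk]
        · simp [hk, he, PySem.Dict.get?_insert]
    · intro k
      rw [bMerge, if_neg (by simp [heq]), if_neg (by simpa using hlt), ihr k]
      simp only [List.map_cons, List.mem_cons] at hnknot ⊢
      by_cases he : k = nk
      · subst he
        tauto
      · tauto

-- keys of a sorted duplicate-free list are strictly increasing
theorem sorted_keys_strict (l : List (String × List (String × String)))
    (hn : (l.map (·.1)).Nodup) :
    ((PySem.List.sorted l (·.1) false).map (·.1)).Pairwise (· < ·) := by
  have hle := PySem.List.sorted_map_key_pairwise l (·.1)
  have hperm : ((PySem.List.sorted l (·.1) false).map (·.1)).Perm (l.map (·.1)) :=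
    (PySem.List.sorted_perm l (·.1) false).map (·.1)
  have hnd : ((PySem.List.sorted l (·.1) false).map (·.1)).Nodup := hperm.nodup_iff.mpr hn
  exact (hle.and hnd).imp (fun h => lt_of_le_of_ne h.1 h.2)

theorem sorted_strict (l : List String) (hn : l.Nodup) :
    (PySem.List.sorted l (fun x => x) false).Pairwise (· < ·) := by
  have hle := PySem.List.sorted_pairwise l (fun x => x)
  have hnd : (PySem.List.sorted l (fun x => x) false).Nodup :=
    (PySem.List.sorted_perm l (fun x => x) false).nodup_iff.mpr hn
  exact (hle.and hnd).imp (fun h => lt_of_le_of_ne h.1 h.2)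

-- Dict membership test agrees with the first-match lookup being successful.
theorem pvKeyMem_eq_isSome (old : List (String × List (String × String))) (k : String) :
    pvKeyMem old k = (pvLookup old k).isSome := by
  simp only [pvKeyMem, pvLookup, Option.isSome_map]
  induction old with
  | nil => rfl
  | cons q t iht =>
    by_cases hq : q.1 == k
    · simp [hq]
    · simp only [Bool.not_eq_true] at hq
      simp [hq, iht]

-- the fused accumulator loop over new_sessions computes A's added/updated comprehensions
theorem pvFoldAU (old : List (String × List (String × String))) :
    ∀ (new : List (String × List (String × String)))
      (a : List (List (String × String)))
      (u : List ((List (String × String)) × (List (String × String)))),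
    new.foldl
      (fun (acc : List (List (String × String)) × List ((List (String × String)) × (List (String × String)))) p =>
        match pvLookup old p.1 with
        | none => (acc.1 ++ [p.2], acc.2)
        | some o => if pvDictEq o p.2 then acc else (acc.1, acc.2 ++ [(o, p.2)]))
      (a, u)
    = (a ++ (new.filter (fun p => !(pvKeyMem old p.1))).map (·.2),
       u ++ new.filterMap (fun p =>
         match pvLookup old p.1 with
         | some o => if !(pvDictEq o p.2) then some (o, p.2) else none
         | none => none)) := by
  intro new
  induction new with
  | nil => simp
  | cons p rest ih =>
    intro a u
    have hmem := pvKeyMem_eq_isSome old p.1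
    cases hl : pvLookup old p.1 with
    | none =>
      simp only [List.foldl_cons, List.filter_cons, List.filterMap_cons, hl, hmem,
        Option.isSome_none, Bool.not_false]
      rw [ih]
      simp
    | some o =>
      simp only [List.foldl_cons, List.filter_cons, List.filterMap_cons, hl, hmem,
        Option.isSome_some, Bool.not_true]
      by_cases he : pvDictEq o p.2
      · simp only [he, if_true, Bool.not_true]
        rw [ih]
        simp
      · simp only [Bool.not_eq_true] at he
        simp only [he, Bool.not_false, if_true]
        simp only [Bool.false_eq_true, if_false]
        rw [ih]
        simp

-- ===== VERDICT (by name: the statement is the Claim_ definition above) =====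
theorem get_changed_sessions_py_spec : Claim_equal_get_changed_sessions_py := by
  intro old new _ hpre
  obtain ⟨hnOld, hnNew, -, -⟩ := hpre
  unfold Spec_get_changed_sessions_py get_changed_sessions_py get_changed_sessions_py_alt
  dsimp only
  have hsoStrict := sorted_keys_strict old hnOld
  have hsnStrict := sorted_strict (new.map (·.1)) hnNew
  obtain ⟨hget, hrem⟩ := bMerge_spec (PySem.List.sorted old (·.1) false)
    (PySem.List.sorted (new.map (·.1)) (fun x => x) false)
    PySem.Dict.empty PySem.Set.empty hsoStrict hsnStrict
  -- the status lookup is the old-side first-match lookup, for every key of new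
  have hlook : ∀ p ∈ new,
      (bMerge (PySem.List.sorted old (·.1) false)
        (PySem.List.sorted (new.map (·.1)) (fun x => x) false)
        PySem.Dict.empty PySem.Set.empty).1.getD p.1 none = pvLookup old p.1 := by
    intro p hp
    have hmem : p.1 ∈ PySem.List.sorted (new.map (·.1)) (fun x => x) false :=
      (PySem.List.mem_sorted _ _ _ _).mpr (List.mem_map.mpr ⟨p, hp, rfl⟩)
    rw [PySem.Dict.getD_eq_get?_getD, hget p.1, if_pos hmem, Option.getD_some]
    exact pvLookup_perm _ old (PySem.List.sorted_perm old (·.1) false)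
      ((((PySem.List.sorted_perm old (·.1) false).map (·.1)).nodup_iff).mpr hnOld) p.1
  -- removed-set membership is "key of old, not key of new"
  have hremP : ∀ p ∈ old,
      PySem.Set.contains (bMerge (PySem.List.sorted old (·.1) false)
        (PySem.List.sorted (new.map (·.1)) (fun x => x) false)
        PySem.Dict.empty PySem.Set.empty).2 p.1 = !(pvKeyMem new p.1) := by
    intro p hp
    have h1 : (p.1 ∈ (bMerge (PySem.List.sorted old (·.1) false)
        (PySem.List.sorted (new.map (·.1)) (fun x => x) false)
        PySem.Dict.empty PySem.Set.empty).2) ↔ ¬ (pvKeyMem new p.1 = true) := by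
      rw [hrem p.1]
      have hmemOld : p.1 ∈ (PySem.List.sorted old (·.1) false).map (·.1) := by
        rw [(((PySem.List.sorted_perm old (·.1) false).map (·.1)).mem_iff)]
        exact List.mem_map.mpr ⟨p, hp, rfl⟩
      have hnewIff : (p.1 ∈ PySem.List.sorted (new.map (·.1)) (fun x => x) false) ↔
          pvKeyMem new p.1 = true := by
        rw [PySem.List.mem_sorted, pvKeyMem_iff]
      simp [hmemOld, hnewIff, PySem.Set.empty]
    rw [← PySem.Set.contains_iff] at h1
    cases hc : PySem.Set.contains (bMerge (PySem.List.sorted old (·.1) false)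
        (PySem.List.sorted (new.map (·.1)) (fun x => x) false)
        PySem.Dict.empty PySem.Set.empty).2 p.1 <;>
      cases hk : pvKeyMem new p.1 <;> simp_all
  -- rewrite B's two passes into A's comprehensions
  rw [PySem.List.foldl_congr_mem new _
      (fun (acc : List (List (String × String)) × List ((List (String × String)) × (List (String × String)))) p =>
        match pvLookup old p.1 with
        | none => (acc.1 ++ [p.2], acc.2)
        | some o => if pvDictEq o p.2 then acc else (acc.1, acc.2 ++ [(o, p.2)]))
      ([], [])
      (by intro acc p hp; rw [hlook p hp])]
  rw [pvFoldAU, List.filter_congr hremP]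
  simp
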